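-- pv_equiv track=rewrite | github.com/ammar-qazi/HisaabFlow | backend/csv_preprocessing/csv_preprocessor.py | _has_unmatched_quotes
-- ===== SOURCE A (Python) =====
-- def _has_unmatched_quotes(text: str) -> bool:
--     """Check if text has unmatched quotes"""
--     # Count quotes that are not escaped
--     quote_count = 0
--     escaped = False
--
--     for char in text:
--         if char == '\\':
--             escaped = not escaped
--         elif char == '"' and not escaped:
--             quote_count += 1
--         else:
--             escaped = False
--
--     return quote_count % 2 != 0
-- ===== SOURCE B (Python) =====
-- def _has_unmatched_quotes(text: str) -> bool:
--     """Check if text has unmatched quotes"""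
--     parity = False
--     i = 0
--     n = len(text)
--     while i < n:
--         c = text[i]
--         if c == '\\' and i + 1 < n and text[i + 1] in '\\"':
--             i += 2  # consume the escape pair; it contributes no unescaped quote
--         else:
--             if c == '"':
--                 parity = not parity
--             i += 1
--     return parity
-- ===== Notes on version B (the rewrite author's own statement) =====
-- stated objective: alternative
-- what changed: Replaces A's escape-flag state machine (toggling 'escaped' on every backslash) by a two-character lookahead scan that consumes a backslash-escape pair ('\\' or '\"') in one step and keeps only a quote-parity bit instead of a counter.
import Mathlib
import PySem

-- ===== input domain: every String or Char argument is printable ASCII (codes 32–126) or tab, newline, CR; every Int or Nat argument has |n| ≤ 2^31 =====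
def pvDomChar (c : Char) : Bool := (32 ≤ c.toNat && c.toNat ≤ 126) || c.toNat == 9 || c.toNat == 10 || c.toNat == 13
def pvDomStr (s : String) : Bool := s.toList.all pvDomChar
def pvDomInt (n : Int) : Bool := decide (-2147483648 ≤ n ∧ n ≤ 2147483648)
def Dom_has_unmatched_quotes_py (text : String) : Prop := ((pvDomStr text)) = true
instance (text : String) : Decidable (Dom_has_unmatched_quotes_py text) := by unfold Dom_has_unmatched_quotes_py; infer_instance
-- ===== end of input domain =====

-- B replaces A's escape-flag state machine by a two-character lookahead scan that consumes
-- escape pairs outright and keeps only a parity bit (objective: alternative; same cost).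

-- ===== PORT A =====
-- state = (quote_count, escaped); one step of A's for-loop
def pvAStep (st : Int × Bool) (c : Char) : Int × Bool :=
  if c = '\\' then (st.1, !st.2)
  else if c = '"' && !st.2 then (st.1 + 1, st.2)
  else (st.1, false)

def has_unmatched_quotes_py (text : String) : Bool :=
  ((text.toList.foldl pvAStep (0, false)).1 % 2 != 0)

-- ===== PORT B =====
-- Source B's while loop with index skipping, as recursion on the character list
def pvBGo : List Char → Bool → Bool
  | [], p => p
  | '\\' :: d :: rest, p =>
      if d = '\\' || d = '"' then pvBGo rest p
      else pvBGo (d :: rest) p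
  | '"' :: rest, p => pvBGo rest (!p)
  | _ :: rest, p => pvBGo rest p

def has_unmatched_quotes_py_alt (text : String) : Bool :=
  pvBGo text.toList false

-- ===== PRECONDITION & SPEC =====
def Spec_has_unmatched_quotes_py (text : String) (out : Bool) : Prop := out = has_unmatched_quotes_py_alt text
instance (text : String) (out : Bool) : Decidable (Spec_has_unmatched_quotes_py text out) := by unfold Spec_has_unmatched_quotes_py; infer_instance

-- ===== CLAIM (what is proved, stated in full; the proofs are below) =====
def Claim_equal_has_unmatched_quotes_py : Prop := ∀ (text : String), Dom_has_unmatched_quotes_py text → Spec_has_unmatched_quotes_py text (has_unmatched_quotes_py text)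

-- ===== LEMMAS AND PROOFS =====

theorem pv_parity_succ (n : Int) : ((n + 1) % 2 != 0) = !(n % 2 != 0) := by
  rcases Int.emod_two_eq n with h | h <;> simp [bne, Int.add_emod, h]

theorem pvBGo_esc (d : Char) (h : d = '\\' ∨ d = '"') (rest : List Char) (p : Bool) :
    pvBGo ('\\' :: d :: rest) p = pvBGo rest p := by
  rcases h with h | h <;> subst h <;> simp [pvBGo]

theorem pvBGo_noesc (d : Char) (h1 : d ≠ '\\') (h2 : d ≠ '"') (rest : List Char) (p : Bool) :
    pvBGo ('\\' :: d :: rest) p = pvBGo (d :: rest) p := by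
  simp [pvBGo, h1, h2]

theorem pvBGo_quote (rest : List Char) (p : Bool) : pvBGo ('"' :: rest) p = pvBGo rest (!p) := rfl

theorem pvBGo_other (c : Char) (h1 : c ≠ '\\') (h2 : c ≠ '"') (rest : List Char) (p : Bool) :
    pvBGo (c :: rest) p = pvBGo rest p := by
  simp [pvBGo, h1]

theorem pv_key : ∀ (k : Nat) (l : List Char), l.length ≤ k → ∀ (n : Int),
    pvBGo l (n % 2 != 0) = ((l.foldl pvAStep (n, false)).1 % 2 != 0) := by
  intro k
  induction k with
  | zero =>
    intro l hl n
    have : l = [] := List.length_eq_zero_iff.mp (Nat.le_zero.mp hl)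
    subst this; rfl
  | succ k ih =>
    intro l hl n
    match l with
    | [] => rfl
    | c :: rest =>
      by_cases hb : c = '\\'
      · subst hb
        match rest with
        | [] => simp [pvBGo, pvAStep, List.foldl]
        | d :: r =>
          have hr : r.length ≤ k := by simp at hl; omega
          have hdr : (d :: r).length ≤ k := by simp at hl; simpa using hl
          by_cases hd1 : d = '\\'
          · rw [pvBGo_esc d (Or.inl hd1) r, ih r hr n]
            subst hd1; simp [pvAStep, List.foldl]
          · by_cases hd2 : d = '"'
            · rw [pvBGo_esc d (Or.inr hd2) r, ih r hr n]
              subst hd2; simp [pvAStep, List.foldl]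
            · rw [pvBGo_noesc d hd1 hd2 r, ih (d :: r) hdr n]
              simp [pvAStep, List.foldl, hd1, hd2]
      · have hrest : rest.length ≤ k := by simp at hl; omega
        by_cases hq : c = '"'
        · subst hq
          rw [pvBGo_quote, ← pv_parity_succ, ih rest hrest (n + 1)]
          simp [pvAStep, List.foldl]
        · rw [pvBGo_other c hb hq, ih rest hrest n]
          simp [pvAStep, List.foldl, hb, hq]

-- ===== VERDICT (by name: the statement is the Claim_ definition above) =====
theorem has_unmatched_quotes_py_spec : Claim_equal_has_unmatched_quotes_py := by
  intro text _
  unfold Spec_has_unmatched_quotes_py has_unmatched_quotes_py has_unmatched_quotes_py_alt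
  have h := pv_key text.toList.length text.toList le_rfl 0
  simpa using h.symm
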